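-- pv_equiv track=rewrite | github.com/Goulart98/Universidade | 3º Ano/Processamento de Linguagens e Compiladores/PLCG13Trabalho1/indice_builder.py | indice_builder
-- ===== SOURCE A (Python) =====
-- def indice_builder(autores):
--   autores_sorted = sorted(autores)
--   indice_str = str()
--   letra = None
--   for autor in autores_sorted:
--     if autor[0] != letra:
--       letra = autor[0]
--       indice_str += letra + '\n'
--     if len(autores[autor]) == 1:
--       indice_str += '{0} (1 entrada):\n'.format(autor)
--     else:
--       indice_str += '{0} ({1} entradas):\n'.format(autor,str(len(autores[autor])))
--
--     for entrada in autores[autor]: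
--       indice_str += ' "{1}", {0}, {2}\n'.format(entrada[0],entrada[1],entrada[2])
--     indice_str += '\n\n'
--
--   return indice_str
-- ===== SOURCE B (Python) =====
-- def indice_builder(autores):
--     keys = sorted(autores)
--     lines = []
--     i = 0
--     n = len(keys)
--     while i < n:
--         letter = keys[i][0]
--         j = i
--         while j < n and keys[j][0] == letter:
--             j += 1
--         lines.append(letter + '\n')
--         for autor in keys[i:j]:
--             entradas = autores[autor]
--             c = len(entradas)
--             if c == 1:
--                 lines.append(autor + ' (1 entrada):\n')
--             else:
--                 lines.append(autor + ' (' + str(c) + ' entradas):\n')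
--             for e in entradas:
--                 lines.append(' "' + e[1] + '", ' + e[0] + ', ' + e[2] + '\n')
--             lines.append('\n\n')
--         i = j
--     return ''.join(lines)
-- ===== Notes on version B (the rewrite author's own statement) =====
-- stated objective: alternative
-- what changed: Replaces the running single string with a 'letra' sentinel by first materialising maximal same-initial runs of the sorted keys (group-by-first-letter scan) and emitting a list of lines per group that is joined once at the end.
import Mathlib
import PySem

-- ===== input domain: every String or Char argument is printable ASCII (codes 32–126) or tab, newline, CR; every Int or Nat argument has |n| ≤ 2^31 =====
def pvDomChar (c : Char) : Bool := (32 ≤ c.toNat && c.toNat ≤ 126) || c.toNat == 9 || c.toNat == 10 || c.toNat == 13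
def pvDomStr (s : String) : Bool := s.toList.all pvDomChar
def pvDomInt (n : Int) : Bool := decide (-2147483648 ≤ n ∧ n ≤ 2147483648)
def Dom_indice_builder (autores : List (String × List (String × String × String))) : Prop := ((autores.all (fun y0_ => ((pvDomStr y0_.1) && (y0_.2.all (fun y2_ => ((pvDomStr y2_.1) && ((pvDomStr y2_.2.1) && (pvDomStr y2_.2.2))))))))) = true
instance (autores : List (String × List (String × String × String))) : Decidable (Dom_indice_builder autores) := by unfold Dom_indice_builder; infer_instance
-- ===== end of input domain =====

-- B replaces A's running string with a 'letra' sentinel by a group-by-first-letter scan over the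
-- sorted keys that emits a list of lines joined once at the end (alternative decomposition, same cost).


-- ===== PORT A =====
-- autores[autor]: dict lookup = first match in the association list (total form; the key always comes from autores itself)
def pvEntriesA (autores : List (String × List (String × String × String))) (autor : String) : List (String × String × String) :=
  ((autores.find? (fun p => p.1 == autor)).map Prod.snd).getD []

-- one iteration of A's for-loop over (indice_str, letra); autor[0] is ported as the total take 1 (Pre_ excludes "")
def pvStepA (autores : List (String × List (String × String × String))) (acc : List Char × Option (List Char)) (autor : String) : List Char × Option (List Char) :=
  let l := autor.toList.take 1
  let acc1 := if acc.2 ≠ some l then (acc.1 ++ (l ++ ['\n']), some l) else acc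
  let entradas := pvEntriesA autores autor
  let s :=
    if entradas.length = 1 then
      acc1.1 ++ (autor.toList ++ (" (1 entrada):\n").toList)
    else
      acc1.1 ++ (autor.toList ++ (" (").toList ++ PySem.Int.toChars (entradas.length : Int) ++ (" entradas):\n").toList)
  let s := entradas.foldl (fun s e =>
      s ++ ((" \"").toList ++ e.2.1.toList ++ ("\", ").toList ++ e.1.toList ++ (", ").toList ++ e.2.2.toList ++ ['\n'])) s
  (s ++ ['\n', '\n'], acc1.2)

def indice_builder (autores : List (String × List (String × String × String))) : String :=
  let autores_sorted := PySem.List.sorted (autores.map Prod.fst) (fun x => x) false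
  String.ofList (autores_sorted.foldl (pvStepA autores) ([], none)).1

-- ===== PORT B =====
def pvEntriesB (autores : List (String × List (String × String × String))) (autor : String) : List (String × String × String) :=
  (autores.lookup autor).getD []

def pvCountLineB (autor : String) (c : Nat) : List Char :=
  if c = 1 then autor.toList ++ (" (1 entrada):\n").toList
  else autor.toList ++ (" (").toList ++ PySem.Int.toChars (c : Int) ++ (" entradas):\n").toList

def pvEntryLineB (e : String × String × String) : List Char :=
  (" \"").toList ++ e.2.1.toList ++ ("\", ").toList ++ e.1.toList ++ (", ").toList ++ e.2.2.toList ++ ['\n']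

-- the lines B appends for one author: count line, one line per entry, the blank block
def pvAuthorLinesB (autores : List (String × List (String × String × String))) (autor : String) : List (List Char) :=
  let entradas := pvEntriesB autores autor
  pvCountLineB autor entradas.length :: (entradas.map pvEntryLineB ++ [['\n', '\n']])

-- the inner while-loop of Source B: maximal runs of sorted keys sharing the first letter (keys[i][0] as total take 1)
def pvGroupRuns : List String → List (List Char × List String)
  | [] => []
  | k :: ks =>
    (k.toList.take 1, k :: ks.takeWhile (fun a => a.toList.take 1 == k.toList.take 1)) ::
      pvGroupRuns (ks.dropWhile (fun a => a.toList.take 1 == k.toList.take 1))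
termination_by ks => ks.length
decreasing_by
  have := List.length_dropWhile_le (fun a => a.toList.take 1 == k.toList.take 1) ks
  simp; omega

-- lines of one group: the letter header, then every author's lines
def pvGroupLinesB (autores : List (String × List (String × String × String))) (g : List Char × List String) : List (List Char) :=
  (g.1 ++ ['\n']) :: g.2.flatMap (pvAuthorLinesB autores)

def indice_builder_alt (autores : List (String × List (String × String × String))) : String :=
  let keys := PySem.List.sorted (autores.map Prod.fst) (fun x => x) false
  String.ofList ((pvGroupRuns keys).flatMap (pvGroupLinesB autores)).flatten

-- ===== PRECONDITION & SPEC =====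
-- Pre_ excludes (a) zero-length author names, on which Python A raises IndexError at autor[0], and (b) duplicate
-- keys in the association list, which a Python dict argument cannot represent (the dict collapses them).
def Pre_indice_builder (autores : List (String × List (String × String × String))) : Prop :=
  (autores.map Prod.fst).Nodup ∧ ∀ p ∈ autores, p.1 ≠ ""

instance (autores : List (String × List (String × String × String))) : Decidable (Pre_indice_builder autores) := by unfold Pre_indice_builder; infer_instance

def pvWitness_indice_builder : (List (String × List (String × String × String))) :=
  [("Braga", [("Tit", "J1", "2001"), ("Tat", "J2", "2002")]), ("Abreu", [("T", "J", "1999")])]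

def Spec_indice_builder (autores : List (String × List (String × String × String))) (out : String) : Prop := out = indice_builder_alt autores
instance (autores : List (String × List (String × String × String))) (out : String) : Decidable (Spec_indice_builder autores out) := by unfold Spec_indice_builder; infer_instance

-- ===== CLAIM (what is proved, stated in full; the proofs are below) =====
def Claim_equal_indice_builder : Prop := ∀ (autores : List (String × List (String × String × String))), Dom_indice_builder autores → Pre_indice_builder autores → Spec_indice_builder autores (indice_builder autores)

-- ===== LEMMAS AND PROOFS =====

-- the two dict lookups (first match in the association list) agree
theorem pvEntries_eq (autores : List (String × List (String × String × String))) (autor : String) :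
    pvEntriesB autores autor = pvEntriesA autores autor := by
  unfold pvEntriesA pvEntriesB
  induction autores with
  | nil => rfl
  | cons p t ih =>
    rw [List.lookup_cons, List.find?_cons]
    by_cases h : p.1 = autor
    · have h1 : (autor == p.1) = true := by simp [h]
      have h2 : (p.1 == autor) = true := by simp [h]
      rw [h1, h2]
      rfl
    · have h1 : (autor == p.1) = false := by simp [Ne.symm h]
      have h2 : (p.1 == autor) = false := by simp [h]
      rw [h1, h2]
      exact ih

-- A's entries fold appends exactly B's entry lines
theorem pvStepA_body (autores : List (String × List (String × String × String))) (autor : String)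
    (s : List Char) (letra : Option (List Char)) :
    pvStepA autores (s, letra) autor =
      (if letra ≠ some (autor.toList.take 1) then
        (s ++ autor.toList.take 1 ++ ['\n'] ++ (pvAuthorLinesB autores autor).flatten, some (autor.toList.take 1))
      else (s ++ (pvAuthorLinesB autores autor).flatten, letra)) := by
  simp only [pvStepA, pvEntriesA,
    PySem.List.foldl_append_eq_flatMap (fun (e : String × String × String) => (" \"").toList ++ e.2.1.toList ++ ("\", ").toList ++ e.1.toList ++ (", ").toList ++ e.2.2.toList ++ ['\n'])]
  split_ifs with h1 h2 h2 <;>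
    simp_all [pvAuthorLinesB, pvEntries_eq, pvEntriesA, pvCountLineB, List.flatMap_def, List.append_assoc] <;>
    exact congrArg List.flatten (List.map_congr_left fun e _ => by simp [pvEntryLineB])

-- folding A's step over a run whose authors all start with letter l emits no header
theorem pvFoldA_run (autores : List (String × List (String × String × String))) (run : List String)
    (l : List Char) (hrun : ∀ a ∈ run, a.toList.take 1 = l) (s : List Char) :
    run.foldl (pvStepA autores) (s, some l) =
      (s ++ (run.flatMap (fun a => (pvAuthorLinesB autores a).flatten)), some l) := by
  induction run generalizing s with
  | nil => simp
  | cons a t ih =>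
    have ha : a.toList.take 1 = l := hrun a (by simp)
    simp only [List.foldl_cons, pvStepA_body, ha, ne_eq, not_true_eq_false, if_false]
    rw [ih (fun b hb => hrun b (by simp [hb]))]
    simp [List.flatMap_cons, List.append_assoc]

-- head of a dropWhile fails the predicate
theorem pvDropWhile_head_false {α : Type} (p : α → Bool) (l : List α) (r : α) (t : List α)
    (h : l.dropWhile p = r :: t) : p r = false := by
  induction l with
  | nil => cases h
  | cons x xs ih =>
    rw [List.dropWhile_cons] at h
    split at h
    · exact ih h
    · rename_i hx; cases h; simpa using hx

-- group the right-hand side of the main fold: folding A over the sorted keys, started with a letter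
-- the first key does not carry, produces exactly B's per-group lines
theorem pvFoldA_groups (autores : List (String × List (String × String × String))) :
    ∀ (ks : List String) (s : List Char) (letra : Option (List Char)),
    (∀ k t, ks = k :: t → letra ≠ some (k.toList.take 1)) →
    (ks.foldl (pvStepA autores) (s, letra)).1 =
      s ++ ((pvGroupRuns ks).flatMap (pvGroupLinesB autores)).flatten := by
  intro ks
  induction ks using pvGroupRuns.induct with
  | case1 => intro s letra _; simp [pvGroupRuns]
  | case2 k ks ih =>
    intro s letra hne
    have hk := hne k ks rfl
    have hsplit : ∀ init : List Char × Option (List Char),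
        List.foldl (pvStepA autores) init ks =
          List.foldl (pvStepA autores)
            (List.foldl (pvStepA autores) init (ks.takeWhile (fun a => a.toList.take 1 == k.toList.take 1)))
            (ks.dropWhile (fun a => a.toList.take 1 == k.toList.take 1)) := by
      intro init
      conv_lhs => rw [← List.takeWhile_append_dropWhile
        (p := fun a => a.toList.take 1 == k.toList.take 1) (l := ks)]
      rw [List.foldl_append]
    rw [List.foldl_cons, pvStepA_body, if_pos hk, hsplit,
      pvFoldA_run autores _ (k.toList.take 1)
        (fun a ha => by simpa using List.mem_takeWhile_imp ha)]
    rw [ih]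
    · simp [pvGroupRuns, pvGroupLinesB, List.flatMap_def, List.flatten_append,
        List.flatten_flatten, List.map_map, Function.comp_def, List.append_assoc]
    · intro r t hrt h
      have hf := pvDropWhile_head_false _ ks r t hrt
      simp at hf h
      exact hf h.symm

-- ===== VERDICT (by name: the statement is the Claim_ definition above) =====
theorem indice_builder_spec : Claim_equal_indice_builder := by
  intro autores _ _
  unfold Spec_indice_builder indice_builder indice_builder_alt
  dsimp only
  rw [pvFoldA_groups autores _ [] none (by intro k t _ h; cases h)]
  simp
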